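-- pv_equiv track=rewrite | github.com/XavierFMW/AdventOfCode | 2022/Day8/main.py | get_visible_cells
-- ===== SOURCE A (Python) =====
-- from itertools import product
--
-- def get_row_section(table, row, start, stop):
--     return table[row][start:stop]
--
-- def get_column_section(table, column, start, stop):
--     length = len(table)
--     return tuple(
--         table[row][column] for row in range(length) if start <= row < stop
--     )
--
-- def get_visible_cells(table):
--     max_x = len(table[0]) - 1
--     max_y = len(table) - 1
--     visible = get_edge_cells(max_x, max_y)
--
--     coordinates = product(
--         range(1, max_x),
--         range(1, max_y)
--     )
--     for x, y in coordinates: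
--         if is_cell_visible(table, x, y, max_x, max_y):
--             visible.add((x, y))
--
--     return visible
--
-- def get_edge_cells(max_x, max_y):
--     edges = set()
--     edges |= set(product(range(max_x + 1), (0, max_y)))
--     edges |= set(product((0, max_x), range(max_y + 1)))
--     return edges
--
-- def is_cell_visible(table, x, y, max_x, max_y):
--     cell = table[y][x]
--
--     left = get_row_section(table, y, 0, x)
--     right = get_row_section(table, y, x + 1, max_x + 1)
--     above = get_column_section(table, x, 0, y)
--     below = get_column_section(table, x, y + 1, max_y + 1)
--
--     return cell > true_max(left) or cell > true_max(right) or cell > true_max(above) or cell > true_max(below)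
--
-- def true_max(iterable):
--     if iterable:
--         return max(iterable)
--     return 0
-- ===== SOURCE B (Python) =====
-- def _front_visible(vals):
--     """Indices whose value strictly exceeds every earlier value (first is always visible)."""
--     out = []
--     best = None
--     for i, v in enumerate(vals):
--         if best is None or v > best:
--             out.append(i)
--             best = v
--     return out
--
--
-- def get_visible_cells(table):
--     height = len(table)
--     width = len(table[0])
--     visible = set()
--     # the border is always visible
--     for x in range(width):
--         visible.add((x, 0))
--         visible.add((x, height - 1))
--     for y in range(height):
--         visible.add((0, y))
--         visible.add((width - 1, y))
--     # four linear sweeps with a running maximum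
--     rows = [row[:width] for row in table]
--     cols = [[row[x] for row in rows] for x in range(width)]
--     for y, row in enumerate(rows):
--         for x in _front_visible(row):
--             visible.add((x, y))
--         n = len(row)
--         for x in _front_visible(row[::-1]):
--             visible.add((n - 1 - x, y))
--     for x, col in enumerate(cols):
--         for y in _front_visible(col):
--             visible.add((x, y))
--         n = len(col)
--         for y in _front_visible(col[::-1]):
--             visible.add((x, n - 1 - y))
--     return visible
-- ===== Notes on version B (the rewrite author's own statement) =====
-- stated objective: faster
-- what changed: Replaced the per-cell rescan of its whole row and column (max over four slices for every interior cell) by an always-visible border plus four linear sweeps with a running maximum along every row and column.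
-- outside the precondition, e.g. on get_visible_cells([[1, 2], [3]]): A returns {(1, 0), (0, 1), (1, 1), (0, 0)}, B raises IndexError
import Mathlib
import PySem

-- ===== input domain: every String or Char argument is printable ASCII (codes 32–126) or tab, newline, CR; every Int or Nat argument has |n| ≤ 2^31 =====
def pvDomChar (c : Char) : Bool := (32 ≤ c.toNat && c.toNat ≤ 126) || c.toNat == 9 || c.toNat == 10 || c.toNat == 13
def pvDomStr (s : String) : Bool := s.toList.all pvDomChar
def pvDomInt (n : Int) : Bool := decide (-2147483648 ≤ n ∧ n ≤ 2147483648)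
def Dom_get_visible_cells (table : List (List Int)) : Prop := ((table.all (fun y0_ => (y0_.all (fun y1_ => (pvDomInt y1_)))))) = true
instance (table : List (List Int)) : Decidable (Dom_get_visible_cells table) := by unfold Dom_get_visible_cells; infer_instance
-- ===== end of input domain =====

-- B replaces A's per-cell rescan of its whole row and column by four linear sweeps with a
-- running maximum (objective: faster, O(n*m) instead of O(n*m*(n+m))).
-- Python returns a SET (no observable iteration order; outputs are compared as sets), so both
-- ports return the resulting set canonically sorted lexicographically — exact as a set value.

-- ===== PORT A =====
def pvCanonSet (s : List (Int × Int)) : List (Int × Int) :=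
  PySem.List.sorted s (fun p => (toLex p : Int ×ₗ Int))

def pvA_get_row_section (table : List (List Int)) (row start stop : Int) : List Int :=
  PySem.List.slice (PySem.List.pyGetD table row []) (some start) (some stop)

def pvA_get_column_section (table : List (List Int)) (column start stop : Int) : List Int :=
  let length := PySem.List.len table
  ((PySem.List.pyRange 0 length 1).filter (fun row => decide (start ≤ row) && decide (row < stop))).map
    (fun row => PySem.List.pyGetD (PySem.List.pyGetD table row []) column 0)

-- max(iterable) on a nonempty list is PySem.List.maxD with any default
def pvA_true_max (xs : List Int) : Int :=
  if xs ≠ [] then PySem.List.maxD xs (fun v => v) 0 else 0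

def pvA_is_cell_visible (table : List (List Int)) (x y max_x max_y : Int) : Bool :=
  let cell := PySem.List.pyGetD (PySem.List.pyGetD table y []) x 0
  let left := pvA_get_row_section table y 0 x
  let right := pvA_get_row_section table y (x + 1) (max_x + 1)
  let above := pvA_get_column_section table x 0 y
  let below := pvA_get_column_section table x (y + 1) (max_y + 1)
  decide (cell > pvA_true_max left) || decide (cell > pvA_true_max right) ||
    decide (cell > pvA_true_max above) || decide (cell > pvA_true_max below)

def pvA_get_edge_cells (max_x max_y : Int) : PySem.Set (Int × Int) :=
  let edges : PySem.Set (Int × Int) := PySem.Set.empty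
  let edges := PySem.Set.update edges
    (PySem.Set.ofList ((PySem.List.pyRange 0 (max_x + 1) 1).flatMap (fun x => [(x, (0 : Int)), (x, max_y)])))
  let edges := PySem.Set.update edges
    (PySem.Set.ofList (([(0 : Int), max_x]).flatMap (fun x => (PySem.List.pyRange 0 (max_y + 1) 1).map (fun y => (x, y)))))
  edges

def get_visible_cells (table : List (List Int)) : List (Int × Int) :=
  let max_x := PySem.List.len (PySem.List.pyGetD table 0 []) - 1
  let max_y := PySem.List.len table - 1
  let visible := pvA_get_edge_cells max_x max_y
  let coordinates := (PySem.List.pyRange 1 max_x 1).flatMap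
    (fun x => (PySem.List.pyRange 1 max_y 1).map (fun y => (x, y)))
  let visible := coordinates.foldl
    (fun vis p => if pvA_is_cell_visible table p.1 p.2 max_x max_y then PySem.Set.add vis p else vis)
    visible
  pvCanonSet visible

-- ===== PORT B =====
def pvB_front_visible (vals : List Int) : List Int :=
  ((PySem.List.enumerate vals 0).foldl
    (fun (st : List Int × Option Int) iv =>
      if (match st.2 with | none => true | some b => decide (iv.2 > b)) then (st.1 ++ [iv.1], some iv.2)
      else st)
    ([], none)).1

-- row[::-1] is ported as .reverse (exact by PySem.List.slice?_none_none_neg_one)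
def get_visible_cells_alt (table : List (List Int)) : List (Int × Int) :=
  let height := PySem.List.len table
  let width := PySem.List.len (PySem.List.pyGetD table 0 [])
  let visible : PySem.Set (Int × Int) := PySem.Set.empty
  let visible := (PySem.List.pyRange 0 width 1).foldl
    (fun vis x => PySem.Set.add (PySem.Set.add vis (x, 0)) (x, height - 1)) visible
  let visible := (PySem.List.pyRange 0 height 1).foldl
    (fun vis y => PySem.Set.add (PySem.Set.add vis (0, y)) (width - 1, y)) visible
  let rows := table.map (fun row => PySem.List.slice row none (some width))
  let cols := (PySem.List.pyRange 0 width 1).map (fun x => rows.map (fun row => PySem.List.pyGetD row x 0))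
  let visible := (PySem.List.enumerate rows 0).foldl
    (fun vis yr =>
      let vis := (pvB_front_visible yr.2).foldl (fun v x => PySem.Set.add v (x, yr.1)) vis
      let n := PySem.List.len yr.2
      (pvB_front_visible yr.2.reverse).foldl (fun v x => PySem.Set.add v (n - 1 - x, yr.1)) vis)
    visible
  let visible := (PySem.List.enumerate cols 0).foldl
    (fun vis xc =>
      let vis := (pvB_front_visible xc.2).foldl (fun v y => PySem.Set.add v (xc.1, y)) vis
      let n := PySem.List.len xc.2
      (pvB_front_visible xc.2.reverse).foldl (fun v y => PySem.Set.add v (xc.1, n - 1 - y)) vis)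
    visible
  pvCanonSet visible

-- ===== PRECONDITION & SPEC =====
-- Pre_ excludes the empty table (A raises IndexError on table[0]) and ragged tables having a row
-- shorter than row 0: on those B raises IndexError (its sweeps read every row up to the row-0
-- width), and so does A as soon as the grid has interior cells; the cite shows one where A returns.
def Pre_get_visible_cells (table : List (List Int)) : Prop :=
  table ≠ [] ∧ ∀ row ∈ table, (table.headD []).length ≤ row.length
instance (table : List (List Int)) : Decidable (Pre_get_visible_cells table) := by
  unfold Pre_get_visible_cells; infer_instance

def pvWitness_get_visible_cells : List (List Int) := [[1, 2], [3, 4]]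

def Spec_get_visible_cells (table : List (List Int)) (out : List (Int × Int)) : Prop :=
  out = get_visible_cells_alt table
instance (table : List (List Int)) (out : List (Int × Int)) : Decidable (Spec_get_visible_cells table out) := by
  unfold Spec_get_visible_cells; infer_instance

-- ===== CLAIM (what is proved, stated in full; the proofs are below) =====
def Claim_equal_get_visible_cells : Prop :=
  ∀ (table : List (List Int)), Dom_get_visible_cells table → Pre_get_visible_cells table →
    Spec_get_visible_cells table (get_visible_cells table)

-- ===== LEMMAS AND PROOFS =====

-- generic: membership through a foldl that only (conditionally) inserts
theorem pv_mem_foldl {α β : Type} (F : List β → α → List β)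
    (Q : α → β → Prop) (h : ∀ s a x, x ∈ F s a ↔ x ∈ s ∨ Q a x)
    (l : List α) : ∀ (s : List β) (x : β), x ∈ l.foldl F s ↔ x ∈ s ∨ ∃ a ∈ l, Q a x := by
  induction l with
  | nil => simp
  | cons a l ih =>
    intro s x
    simp only [List.foldl_cons, ih, h, List.mem_cons]
    constructor
    · rintro ((hx | hq) | ⟨b, hb, hq⟩)
      · exact Or.inl hx
      · exact Or.inr ⟨a, Or.inl rfl, hq⟩
      · exact Or.inr ⟨b, Or.inr hb, hq⟩
    · rintro (hx | ⟨b, (rfl | hb), hq⟩)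
      · exact Or.inl (Or.inl hx)
      · exact Or.inl (Or.inr hq)
      · exact Or.inr ⟨b, hb, hq⟩

theorem pv_nodup_foldl {α β : Type} (F : List β → α → List β)
    (h : ∀ s a, s.Nodup → (F s a).Nodup) (l : List α) : ∀ s, s.Nodup → (l.foldl F s).Nodup := by
  induction l with
  | nil => intro s hs; simpa using hs
  | cons a l ih => intro s hs; exact ih _ (h _ _ hs)

-- the value of cell (x, y) of the grid
def pvVal (t : List (List Int)) (x y : Nat) : Int := (t.getD y []).getD x 0

-- visibility of cell (x, y) from one of the four edges
def pvVis (t : List (List Int)) (x y : Nat) : Prop :=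
  (∀ j, j < x → pvVal t j y < pvVal t x y) ∨
  (∀ j, x < j → j < (t.headD []).length → pvVal t j y < pvVal t x y) ∨
  (∀ j, j < y → pvVal t x j < pvVal t x y) ∨
  (∀ j, y < j → j < t.length → pvVal t x j < pvVal t x y)

-- recursive specification of pvB_front_visible
def pvFv : List Int → Int → Option Int → List Int
  | [], _, _ => []
  | v :: vs, s, best =>
    if (match best with | none => true | some b => decide (v > b)) then s :: pvFv vs (s + 1) (some v)
    else pvFv vs (s + 1) best

theorem pvFv_fold (vals : List Int) : ∀ (s : Int) (out : List Int) (best : Option Int),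
    ((PySem.List.enumerate vals s).foldl
      (fun (st : List Int × Option Int) iv =>
        if (match st.2 with | none => true | some b => decide (iv.2 > b)) then (st.1 ++ [iv.1], some iv.2)
        else st)
      (out, best)).1 = out ++ pvFv vals s best := by
  induction vals with
  | nil => intro s out best; simp [PySem.List.enumerate_nil, pvFv]
  | cons v vs ih =>
    intro s out best
    rw [PySem.List.enumerate_cons]
    simp only [List.foldl_cons]
    cases best with
    | none => simp [pvFv, ih]
    | some b =>
      by_cases hvb : v > b
      · simp [pvFv, hvb, ih]
      · simp [pvFv, hvb, ih]

theorem pvB_front_visible_eq (vals : List Int) : pvB_front_visible vals = pvFv vals 0 none := by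
  simpa using pvFv_fold vals 0 [] none

theorem pvFv_mem (vals : List Int) : ∀ (s : Int) (best : Option Int) (i : Int),
    i ∈ pvFv vals s best ↔ ∃ k : Nat, k < vals.length ∧ i = s + k ∧
      (∀ b, best = some b → b < vals.getD k 0) ∧ (∀ j, j < k → vals.getD j 0 < vals.getD k 0) := by
  induction vals with
  | nil => simp [pvFv]
  | cons v vs ih =>
    intro s best i
    have hcons0 : (v :: vs).getD 0 0 = v := rfl
    have hconsS : ∀ m : Nat, (v :: vs).getD (m + 1) 0 = vs.getD m 0 := fun m => rfl
    have hlen : (v :: vs).length = vs.length + 1 := rfl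
    -- the marked case, shared by best = none and best = some b with b < v
    have hmarked : ∀ (P : Prop), (∀ b, best = some b → (b < v ∧ P)) → (best = none → P) →
      pvFv (v :: vs) s best = s :: pvFv vs (s + 1) (some v) →
      (i ∈ pvFv (v :: vs) s best ↔ ∃ k : Nat, k < (v :: vs).length ∧ i = s + k ∧
        (∀ b, best = some b → b < (v :: vs).getD k 0) ∧
        (∀ j, j < k → (v :: vs).getD j 0 < (v :: vs).getD k 0)) := by
      intro P hsome hnone heq
      rw [heq]
      constructor
      · intro hmem
        rcases List.mem_cons.1 hmem with rfl | hmem'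
        · refine ⟨0, by omega, by simp, ?_, by omega⟩
          intro b hb
          rw [hcons0]
          exact (hsome b hb).1
        · rcases (ih (s + 1) (some v) i).1 hmem' with ⟨k, hk, hi, hbest, hpref⟩
          have hvk : v < vs.getD k 0 := hbest v rfl
          refine ⟨k + 1, by omega, by rw [hi]; push_cast; ring, ?_, ?_⟩
          · intro b hb
            rw [hconsS]
            exact lt_trans (hsome b hb).1 hvk
          · intro j hj
            cases j with
            | zero => rw [hcons0, hconsS]; exact hvk
            | succ m => rw [hconsS, hconsS]; exact hpref m (by omega)
      · rintro ⟨k, hk, rfl, hbest, hpref⟩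
        cases k with
        | zero => simp
        | succ m =>
          apply List.mem_cons_of_mem
          apply (ih (s + 1) (some v) _).2
          refine ⟨m, by omega, by push_cast; ring, ?_, ?_⟩
          · intro b hb; cases hb
            have := hpref 0 (by omega)
            rwa [hcons0, hconsS] at this
          · intro j hj
            have := hpref (j + 1) (by omega)
            rwa [hconsS, hconsS] at this
    cases best with
    | none =>
      exact hmarked True (by intro b hb; cases hb) (fun _ => trivial) (by simp [pvFv])
    | some b =>
      by_cases hvb : b < v
      · exact hmarked True (by intro b' hb'; cases hb'; exact ⟨hvb, trivial⟩) (by intro h; cases h)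
          (by simp [pvFv, hvb])
      · have heq : pvFv (v :: vs) s (some b) = pvFv vs (s + 1) (some b) := by
          simp only [pvFv]
          rw [if_neg]
          simp only [decide_eq_true_eq]
          omega
        rw [heq, ih]
        constructor
        · rintro ⟨k, hk, hi, hbest, hpref⟩
          have hbk : b < vs.getD k 0 := hbest b rfl
          refine ⟨k + 1, by omega, by rw [hi]; push_cast; ring, ?_, ?_⟩
          · intro b' hb'; cases hb'; rw [hconsS]; exact hbk
          · intro j hj
            cases j with
            | zero => rw [hcons0, hconsS]; omega
            | succ m => rw [hconsS, hconsS]; exact hpref m (by omega)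
        · rintro ⟨k, hk, rfl, hbest, hpref⟩
          cases k with
          | zero =>
            exfalso
            have := hbest b rfl
            rw [hcons0] at this
            omega
          | succ m =>
            refine ⟨m, by omega, by push_cast; ring, ?_, ?_⟩
            · intro b' hb'; cases hb'
              have := hbest b rfl
              rwa [hconsS] at this
            · intro j hj
              have := hpref (j + 1) (by omega)
              rwa [hconsS, hconsS] at this

theorem pvB_fv_mem (vals : List Int) (i : Int) :
    i ∈ pvB_front_visible vals ↔ ∃ k : Nat, k < vals.length ∧ i = (k : Int) ∧
      ∀ j, j < k → vals.getD j 0 < vals.getD k 0 := by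
  rw [pvB_front_visible_eq, pvFv_mem]
  simp

-- the two sets before canonical sorting (let-free but definitionally equal to the port bodies)
def pvASet (t : List (List Int)) : List (Int × Int) :=
  ((PySem.List.pyRange 1 (PySem.List.len (PySem.List.pyGetD t 0 []) - 1) 1).flatMap
    (fun x => (PySem.List.pyRange 1 (PySem.List.len t - 1) 1).map (fun y => (x, y)))).foldl
    (fun vis p => if pvA_is_cell_visible t p.1 p.2 (PySem.List.len (PySem.List.pyGetD t 0 []) - 1)
        (PySem.List.len t - 1) then PySem.Set.add vis p else vis)
    (pvA_get_edge_cells (PySem.List.len (PySem.List.pyGetD t 0 []) - 1) (PySem.List.len t - 1))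

def pvRows (t : List (List Int)) : List (List Int) :=
  t.map (fun row => PySem.List.slice row none (some (PySem.List.len (PySem.List.pyGetD t 0 []))))

def pvCols (t : List (List Int)) : List (List Int) :=
  (PySem.List.pyRange 0 (PySem.List.len (PySem.List.pyGetD t 0 [])) 1).map
    (fun x => (pvRows t).map (fun row => PySem.List.pyGetD row x 0))

def pvBorder (t : List (List Int)) : List (Int × Int) :=
  (PySem.List.pyRange 0 (PySem.List.len t) 1).foldl
    (fun vis y => PySem.Set.add (PySem.Set.add vis (0, y))
      (PySem.List.len (PySem.List.pyGetD t 0 []) - 1, y))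
    ((PySem.List.pyRange 0 (PySem.List.len (PySem.List.pyGetD t 0 [])) 1).foldl
      (fun vis x => PySem.Set.add (PySem.Set.add vis (x, 0)) (x, PySem.List.len t - 1))
      PySem.Set.empty)

def pvBSet (t : List (List Int)) : List (Int × Int) :=
  (PySem.List.enumerate (pvCols t) 0).foldl
    (fun vis xc =>
      (pvB_front_visible xc.2.reverse).foldl
        (fun v y => PySem.Set.add v (xc.1, PySem.List.len xc.2 - 1 - y))
        ((pvB_front_visible xc.2).foldl (fun v y => PySem.Set.add v (xc.1, y)) vis))
    ((PySem.List.enumerate (pvRows t) 0).foldl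
      (fun vis yr =>
        (pvB_front_visible yr.2.reverse).foldl
          (fun v x => PySem.Set.add v (PySem.List.len yr.2 - 1 - x, yr.1))
          ((pvB_front_visible yr.2).foldl (fun v x => PySem.Set.add v (x, yr.1)) vis))
      (pvBorder t))

theorem pvA_eq (t : List (List Int)) : get_visible_cells t = pvCanonSet (pvASet t) := rfl

theorem pvB_eq (t : List (List Int)) : get_visible_cells_alt t = pvCanonSet (pvBSet t) := rfl

theorem pvASet_nodup (t : List (List Int)) : (pvASet t).Nodup := by
  unfold pvASet
  apply pv_nodup_foldl
  · intro s a hs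
    split
    · exact PySem.Set.nodup_add s a hs
    · exact hs
  · exact PySem.Set.nodup_update _ _ (PySem.Set.nodup_update _ _ List.nodup_nil)

theorem pvBorder_nodup (t : List (List Int)) : (pvBorder t).Nodup := by
  unfold pvBorder
  apply pv_nodup_foldl
  · intro s a hs
    exact PySem.Set.nodup_add _ _ (PySem.Set.nodup_add _ _ hs)
  · apply pv_nodup_foldl
    · intro s a hs
      exact PySem.Set.nodup_add _ _ (PySem.Set.nodup_add _ _ hs)
    · exact List.nodup_nil

theorem pvBSet_nodup (t : List (List Int)) : (pvBSet t).Nodup := by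
  unfold pvBSet
  apply pv_nodup_foldl
  · intro s a hs
    apply pv_nodup_foldl
    · intro s' a' hs'; exact PySem.Set.nodup_add _ _ hs'
    · apply pv_nodup_foldl
      · intro s' a' hs'; exact PySem.Set.nodup_add _ _ hs'
      · exact hs
  · apply pv_nodup_foldl
    · intro s a hs
      apply pv_nodup_foldl
      · intro s' a' hs'; exact PySem.Set.nodup_add _ _ hs'
      · apply pv_nodup_foldl
        · intro s' a' hs'; exact PySem.Set.nodup_add _ _ hs'
        · exact hs
    · exact pvBorder_nodup t

theorem pvGetD0 (t : List (List Int)) : PySem.List.pyGetD t 0 [] = t.headD [] := by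
  cases t <;> simp [PySem.List.pyGetD_zero]

theorem pv_gt_maxD (xs : List Int) (hne : xs ≠ []) (c : Int) :
    (pvA_true_max xs < c) ↔ ∀ v ∈ xs, v < c := by
  unfold pvA_true_max
  rw [if_pos hne]
  constructor
  · intro h1 v hv
    exact lt_of_le_of_lt (PySem.List.le_maxD_id xs 0 v hv) h1
  · intro h1
    exact h1 _ (PySem.List.maxD_mem xs _ 0 hne)

theorem pv_rev_cond (g : Nat → Int) (n k : Nat) (hk : k < n) :
    (∀ j, j < k → g (n - 1 - j) < g (n - 1 - k)) ↔
      (∀ j, n - 1 - k < j → j < n → g j < g (n - 1 - k)) := by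
  constructor
  · intro hc j hj1 hj2
    have hrw : n - 1 - (n - 1 - j) = j := by omega
    have := hc (n - 1 - j) (by omega)
    rwa [hrw] at this
  · intro hc j hj
    exact hc (n - 1 - j) (by omega) (by omega)

theorem pvVis_left (t : List (List Int)) (y : Nat) : pvVis t 0 y :=
  Or.inl (fun j hj => absurd hj (Nat.not_lt_zero j))

theorem pvVis_right (t : List (List Int)) (y : Nat) : pvVis t ((t.headD []).length - 1) y :=
  Or.inr (Or.inl (fun j hj1 hj2 => absurd hj2 (by omega)))

theorem pvVis_top (t : List (List Int)) (x : Nat) : pvVis t x 0 :=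
  Or.inr (Or.inr (Or.inl (fun j hj => absurd hj (Nat.not_lt_zero j))))

theorem pvVis_bottom (t : List (List Int)) (x : Nat) : pvVis t x (t.length - 1) :=
  Or.inr (Or.inr (Or.inr (fun j hj1 hj2 => absurd hj2 (by omega))))

theorem pv_mem_take_drop (l : List Int) (m n : Nat) (v : Int) :
    v ∈ (l.drop m).take n ↔ ∃ j : Nat, j < n ∧ m + j < l.length ∧ v = l.getD (m + j) 0 := by
  rw [List.mem_take_iff_getElem]
  constructor
  · rintro ⟨j, hj, rfl⟩
    rw [List.length_drop] at hj
    refine ⟨j, by omega, by omega, ?_⟩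
    rw [List.getD_eq_getElem _ _ (by omega), List.getElem_drop]
  · rintro ⟨j, hj1, hj2, rfl⟩
    refine ⟨j, by rw [List.length_drop]; omega, ?_⟩
    rw [List.getD_eq_getElem _ _ hj2]
    exact List.getElem_drop

theorem pv_mem_take (l : List Int) (n : Nat) (v : Int) :
    v ∈ l.take n ↔ ∃ j : Nat, j < n ∧ j < l.length ∧ v = l.getD j 0 := by
  have := pv_mem_take_drop l 0 n v
  simpa using this

theorem pv_row_mem (t : List (List Int)) (z : Nat) (hz : z < t.length) : t.getD z [] ∈ t := by
  rw [List.getD_eq_getElem _ _ hz]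
  exact List.getElem_mem _

set_option maxHeartbeats 1000000 in
theorem pvA_vis_char (t : List (List Int))
    (hpre : ∀ row ∈ t, (t.headD []).length ≤ row.length)
    (x y : Nat) (hx0 : 0 < x) (hx1 : x + 1 < (t.headD []).length)
    (hy0 : 0 < y) (hy1 : y + 1 < t.length) :
    (pvA_is_cell_visible t (x : Int) (y : Int) (((t.headD []).length : Int) - 1) ((t.length : Int) - 1) = true)
      ↔ pvVis t x y := by
  set w := (t.headD []).length with hw
  set h := t.length with hh
  have hrow : w ≤ (t.getD y []).length := hpre _ (pv_row_mem t y (by omega))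
  -- the four sections
  have hcell : PySem.List.pyGetD (PySem.List.pyGetD t (y : Int) []) (x : Int) 0 = pvVal t x y := by
    simp [pvVal]
  have hleft : pvA_get_row_section t (y : Int) 0 (x : Int) = (t.getD y []).take x := by
    unfold pvA_get_row_section
    rw [PySem.List.slice_zero_start, PySem.List.slice_to _ (by positivity)]
    simp
  have hleft_ne : (t.getD y []).take x ≠ [] := by
    have : ((t.getD y []).take x).length = x := by rw [List.length_take]; omega
    intro h0; rw [h0] at this; simp at this; omega
  have hright : pvA_get_row_section t (y : Int) ((x : Int) + 1) (((w : Int) - 1) + 1)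
      = ((t.getD y []).drop (x + 1)).take (w - (x + 1)) := by
    unfold pvA_get_row_section
    rw [show ((w : Int) - 1) + 1 = ((w : Nat) : Int) by ring,
      show ((x : Int) + 1) = (((x + 1 : Nat)) : Int) by push_cast; ring,
      PySem.List.slice_natCast]
    simp
  have hright_ne : ((t.getD y []).drop (x + 1)).take (w - (x + 1)) ≠ [] := by
    have : (((t.getD y []).drop (x + 1)).take (w - (x + 1))).length = w - (x + 1) := by
      rw [List.length_take, List.length_drop]; omega
    intro h0; rw [h0] at this; simp at this; omega
  have habove : ∀ v, v ∈ pvA_get_column_section t (x : Int) 0 (y : Int)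
      ↔ ∃ j : Nat, j < y ∧ v = pvVal t x j := by
    intro v
    unfold pvA_get_column_section
    simp only [List.mem_map, List.mem_filter, PySem.List.mem_pyRange_one, PySem.List.len_eq,
      Bool.and_eq_true, decide_eq_true_eq]
    constructor
    · rintro ⟨r, ⟨⟨hr0, hrh⟩, hr0', hry⟩, rfl⟩
      obtain ⟨j, rfl⟩ : ∃ j : Nat, r = (j : Int) := ⟨r.toNat, by omega⟩
      exact ⟨j, by omega, by simp [pvVal]⟩
    · rintro ⟨j, hj, rfl⟩
      refine ⟨(j : Int), ⟨⟨by positivity, by exact_mod_cast (by omega : j < h)⟩, by positivity,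
        by exact_mod_cast hj⟩, by simp [pvVal]⟩
  have habove_ne : pvA_get_column_section t (x : Int) 0 (y : Int) ≠ [] :=
    List.ne_nil_of_mem ((habove _).2 ⟨0, by omega, rfl⟩)
  have hbelow : ∀ v, v ∈ pvA_get_column_section t (x : Int) ((y : Int) + 1) (((h : Int) - 1) + 1)
      ↔ ∃ j : Nat, y < j ∧ j < h ∧ v = pvVal t x j := by
    intro v
    unfold pvA_get_column_section
    simp only [List.mem_map, List.mem_filter, PySem.List.mem_pyRange_one, PySem.List.len_eq,
      Bool.and_eq_true, decide_eq_true_eq]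
    constructor
    · rintro ⟨r, ⟨⟨hr0, hrh⟩, hry, hrh'⟩, rfl⟩
      obtain ⟨j, rfl⟩ : ∃ j : Nat, r = (j : Int) := ⟨r.toNat, by omega⟩
      refine ⟨j, by omega, by omega, by simp [pvVal]⟩
    · rintro ⟨j, hj1, hj2, rfl⟩
      refine ⟨(j : Int), ⟨⟨by positivity, by exact_mod_cast hj2⟩,
        by exact_mod_cast (by omega : (y : Int) + 1 ≤ (j : Int)), by omega⟩, by simp [pvVal]⟩
  have hbelow_ne : pvA_get_column_section t (x : Int) ((y : Int) + 1) (((h : Int) - 1) + 1) ≠ [] :=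
    List.ne_nil_of_mem ((hbelow _).2 ⟨y + 1, by omega, by omega, rfl⟩)
  -- assemble
  have hLiff : (∀ v ∈ (t.getD y []).take x, v < pvVal t x y)
      ↔ (∀ j, j < x → pvVal t j y < pvVal t x y) := by
    constructor
    · intro hv j hj
      exact hv (pvVal t j y) ((pv_mem_take _ _ _).2 ⟨j, hj, by omega, rfl⟩)
    · intro hv v hvm
      rcases (pv_mem_take _ _ _).1 hvm with ⟨j, hj1, hj2, rfl⟩
      exact hv j hj1
  have hRiff : (∀ v ∈ ((t.getD y []).drop (x + 1)).take (w - (x + 1)), v < pvVal t x y)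
      ↔ (∀ j, x < j → j < w → pvVal t j y < pvVal t x y) := by
    constructor
    · intro hv j hj1 hj2
      have := hv (pvVal t j y) ((pv_mem_take_drop _ _ _ _).2 ⟨j - (x + 1), by omega, by omega,
        by rw [show x + 1 + (j - (x + 1)) = j by omega]; rfl⟩)
      exact this
    · intro hv v hvm
      rcases (pv_mem_take_drop _ _ _ _).1 hvm with ⟨j, hj1, hj2, rfl⟩
      exact hv (x + 1 + j) (by omega) (by omega)
  have hAiff : (∀ v ∈ pvA_get_column_section t (x : Int) 0 (y : Int), v < pvVal t x y)
      ↔ (∀ j, j < y → pvVal t x j < pvVal t x y) := by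
    constructor
    · intro hv j hj
      exact hv (pvVal t x j) ((habove _).2 ⟨j, hj, rfl⟩)
    · intro hv v hvm
      rcases (habove v).1 hvm with ⟨j, hj, rfl⟩
      exact hv j hj
  have hBiff : (∀ v ∈ pvA_get_column_section t (x : Int) ((y : Int) + 1) (((h : Int) - 1) + 1), v < pvVal t x y)
      ↔ (∀ j, y < j → j < h → pvVal t x j < pvVal t x y) := by
    constructor
    · intro hv j hj1 hj2
      exact hv (pvVal t x j) ((hbelow _).2 ⟨j, hj1, hj2, rfl⟩)
    · intro hv v hvm
      rcases (hbelow v).1 hvm with ⟨j, hj1, hj2, rfl⟩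
      exact hv j hj1 hj2
  unfold pvA_is_cell_visible
  simp only [Bool.or_eq_true, decide_eq_true_eq, gt_iff_lt]
  rw [hcell, hleft, hright]
  rw [pv_gt_maxD _ hleft_ne, pv_gt_maxD _ hright_ne, pv_gt_maxD _ habove_ne, pv_gt_maxD _ hbelow_ne]
  rw [hLiff, hRiff, hAiff, hBiff]
  unfold pvVis
  rw [← hw, ← hh]
  tauto

set_option maxHeartbeats 1000000 in
theorem pvA_mem (t : List (List Int)) (hne : t ≠ [])
    (hpre : ∀ row ∈ t, (t.headD []).length ≤ row.length) (hw0 : 0 < (t.headD []).length)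
    (p : Int × Int) :
    p ∈ pvASet t ↔ ∃ x y : Nat, x < (t.headD []).length ∧ y < t.length ∧
      p = ((x : Int), (y : Int)) ∧ pvVis t x y := by
  set w := (t.headD []).length with hw
  set h := t.length with hh
  have hh0 : 0 < h := List.length_pos_iff.2 hne
  have hmx : PySem.List.len (PySem.List.pyGetD t 0 []) - 1 = (w : Int) - 1 := by
    rw [pvGetD0]; simp [hw]
  have hmy : PySem.List.len t - 1 = (h : Int) - 1 := by simp [hh]
  unfold pvASet
  rw [hmx, hmy]
  rw [pv_mem_foldl _
    (fun (a : Int × Int) q => pvA_is_cell_visible t a.1 a.2 ((w : Int) - 1) ((h : Int) - 1) = true ∧ q = a)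
    (by
      intro s a q
      split
      · next hc => rw [PySem.Set.mem_add]; tauto
      · next hc => constructor
                   · exact fun hq => Or.inl hq
                   · rintro (hq | ⟨hc', rfl⟩)
                     · exact hq
                     · exact absurd hc' hc)]
  -- edge membership
  have hedges : ∀ q : Int × Int, q ∈ pvA_get_edge_cells ((w : Int) - 1) ((h : Int) - 1) ↔
      (∃ xi : Int, (0 ≤ xi ∧ xi < (w : Int)) ∧ (q = (xi, 0) ∨ q = (xi, (h : Int) - 1))) ∨
      ((q.1 = 0 ∨ q.1 = (w : Int) - 1) ∧ ∃ yi : Int, (0 ≤ yi ∧ yi < (h : Int)) ∧ q = (q.1, yi)) := by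
    intro q
    unfold pvA_get_edge_cells
    rw [show (w : Int) - 1 + 1 = (w : Int) by ring, show (h : Int) - 1 + 1 = (h : Int) by ring]
    simp only [PySem.Set.mem_update, PySem.Set.mem_ofList, List.mem_flatMap, List.mem_map,
      PySem.List.mem_pyRange_one, PySem.Set.empty, List.not_mem_nil, false_or, List.mem_cons]
    constructor
    · rintro (⟨xi, hxi, (rfl | rfl | hfalse)⟩ | ⟨xi, (rfl | rfl | hfalse), yi, hyi, rfl⟩)
      · exact Or.inl ⟨xi, hxi, Or.inl rfl⟩
      · exact Or.inl ⟨xi, hxi, Or.inr rfl⟩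
      · exact absurd hfalse (by simp)
      · exact Or.inr ⟨Or.inl rfl, yi, hyi, rfl⟩
      · exact Or.inr ⟨Or.inr rfl, yi, hyi, rfl⟩
      · exact absurd hfalse (by simp)
    · rintro (⟨xi, hxi, (rfl | rfl)⟩ | ⟨hq1, yi, hyi, hq⟩)
      · exact Or.inl ⟨xi, hxi, Or.inl rfl⟩
      · exact Or.inl ⟨xi, hxi, Or.inr (Or.inl rfl)⟩
      · rcases hq1 with h1 | h1
        · exact Or.inr ⟨0, Or.inl rfl, yi, hyi, by rw [hq, h1]⟩
        · exact Or.inr ⟨(w : Int) - 1, Or.inr (Or.inl rfl), yi, hyi, by rw [hq, h1]⟩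
  rw [hedges]
  -- coordinates membership
  have hcoords : ∀ q : Int × Int,
      (q ∈ (PySem.List.pyRange 1 ((w : Int) - 1) 1).flatMap
        (fun x => (PySem.List.pyRange 1 ((h : Int) - 1) 1).map (fun y => (x, y)))) ↔
      (1 ≤ q.1 ∧ q.1 < (w : Int) - 1 ∧ 1 ≤ q.2 ∧ q.2 < (h : Int) - 1) := by
    intro q
    simp only [List.mem_flatMap, List.mem_map, PySem.List.mem_pyRange_one]
    constructor
    · rintro ⟨xi, hxi, yi, hyi, rfl⟩
      exact ⟨hxi.1, hxi.2, hyi.1, hyi.2⟩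
    · rintro ⟨h1, h2, h3, h4⟩
      exact ⟨q.1, ⟨h1, h2⟩, q.2, ⟨h3, h4⟩, rfl⟩
  constructor
  · rintro ((⟨xi, hxi, (rfl | rfl)⟩ | ⟨hq1, yi, hyi, hq⟩) | ⟨a, ha, hvis, rfl⟩)
    · exact ⟨xi.toNat, 0, by omega, by omega, by simp; omega, pvVis_top t xi.toNat⟩
    · refine ⟨xi.toNat, h - 1, by omega, by omega, by simp; omega, pvVis_bottom t xi.toNat⟩
    · rcases hq1 with h1 | h1
      · exact ⟨0, yi.toNat, by omega, by omega, by rw [hq, h1]; simp; omega, pvVis_left t yi.toNat⟩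
      · refine ⟨w - 1, yi.toNat, by omega, by omega, by rw [hq, h1]; simp; omega, pvVis_right t yi.toNat⟩
    · rcases (hcoords p).1 ha with ⟨h1, h2, h3, h4⟩
      refine ⟨p.1.toNat, p.2.toNat, by omega, by omega, by rw [Prod.ext_iff]; exact ⟨by simp; omega, by simp; omega⟩, ?_⟩
      have hx : p.1 = ((p.1.toNat : Nat) : Int) := by omega
      have hy : p.2 = ((p.2.toNat : Nat) : Int) := by omega
      rw [← pvA_vis_char t hpre p.1.toNat p.2.toNat (by omega) (by omega) (by omega) (by omega)]
      rw [← hx, ← hy]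
      exact hvis
  · rintro ⟨x, y, hx, hy, rfl, hvis⟩
    by_cases hedge : x = 0 ∨ x = w - 1 ∨ y = 0 ∨ y = h - 1
    · rcases hedge with rfl | h1 | rfl | h1
      · exact Or.inl (Or.inr ⟨Or.inl rfl, (y : Int), ⟨by positivity, by exact_mod_cast hy⟩, rfl⟩)
      · exact Or.inl (Or.inr ⟨Or.inr (by omega), (y : Int), ⟨by positivity, by exact_mod_cast hy⟩, rfl⟩)
      · exact Or.inl (Or.inl ⟨(x : Int), ⟨by positivity, by exact_mod_cast hx⟩, Or.inl rfl⟩)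
      · exact Or.inl (Or.inl ⟨(x : Int), ⟨by positivity, by exact_mod_cast hx⟩,
          Or.inr (by rw [Prod.ext_iff]; exact ⟨rfl, by omega⟩)⟩)
    · simp only [not_or] at hedge
      obtain ⟨he1, he2, he3, he4⟩ := hedge
      refine Or.inr ⟨((x : Int), (y : Int)), (hcoords _).2 ⟨by omega, by omega,
        by omega, by omega⟩, ?_, rfl⟩
      exact (pvA_vis_char t hpre x y (by omega) (by omega) (by omega) (by omega)).2 hvis

theorem pv_getD_map {α β : Type} (f : α → β) (l : List α) (y : Nat) (hy : y < l.length)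
    (d : α) (d' : β) : (l.map f).getD y d' = f (l.getD y d) := by
  rw [List.getD_eq_getElem _ _ (by simpa using hy), List.getElem_map, List.getD_eq_getElem _ _ hy]

theorem pv_getD_take (l : List Int) (n j : Nat) (hj : j < n) (hjl : j < l.length) :
    (l.take n).getD j 0 = l.getD j 0 := by
  rw [List.getD_eq_getElem _ _ (by rw [List.length_take]; omega), List.getElem_take,
    List.getD_eq_getElem _ _ hjl]

theorem pvB_line_fwd (vals : List Int) (g : Nat → Int) (n : Nat) (hlen : vals.length = n)
    (hval : ∀ j, j < n → vals.getD j 0 = g j) (i : Int) :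
    i ∈ pvB_front_visible vals ↔ ∃ k : Nat, k < n ∧ i = (k : Int) ∧ ∀ j, j < k → g j < g k := by
  rw [pvB_fv_mem]
  constructor
  · rintro ⟨k, hk, rfl, hc⟩
    rw [hlen] at hk
    refine ⟨k, hk, rfl, ?_⟩
    intro j hj
    have := hc j hj
    rwa [hval j (by omega), hval k hk] at this
  · rintro ⟨k, hk, rfl, hc⟩
    refine ⟨k, by omega, rfl, ?_⟩
    intro j hj
    rw [hval j (by omega), hval k hk]
    exact hc j hj

theorem pvB_line_rev (vals : List Int) (g : Nat → Int) (n : Nat) (hlen : vals.length = n)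
    (hval : ∀ j, j < n → vals.getD j 0 = g j) (i : Int) :
    i ∈ pvB_front_visible vals.reverse ↔ ∃ k : Nat, k < n ∧ i = (k : Int) ∧
      ∀ j, n - 1 - k < j → j < n → g j < g (n - 1 - k) := by
  have hrev : ∀ j, j < n → vals.reverse.getD j 0 = g (n - 1 - j) := by
    intro j hj
    have h1 : j < vals.reverse.length := by rw [List.length_reverse]; omega
    rw [List.getD_eq_getElem _ _ h1, List.getElem_reverse]
    have h2 : vals.length - 1 - j < vals.length := by omega
    rw [← List.getD_eq_getElem vals 0 h2, show vals.length - 1 - j = n - 1 - j by omega]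
    exact hval _ (by omega)
  rw [pvB_fv_mem]
  constructor
  · rintro ⟨k, hk, rfl, hc⟩
    rw [List.length_reverse, hlen] at hk
    refine ⟨k, hk, rfl, ?_⟩
    refine (pv_rev_cond g n k hk).1 ?_
    intro j hj
    have := hc j hj
    rwa [hrev j (by omega), hrev k hk] at this
  · rintro ⟨k, hk, rfl, hc⟩
    refine ⟨k, by rw [List.length_reverse, hlen]; omega, rfl, ?_⟩
    intro j hj
    rw [hrev j (by omega), hrev k hk]
    exact (pv_rev_cond g n k hk).2 hc j hj

set_option maxHeartbeats 2000000 in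
theorem pvB_mem (t : List (List Int)) (hne : t ≠ [])
    (hpre : ∀ row ∈ t, (t.headD []).length ≤ row.length) (hw0 : 0 < (t.headD []).length)
    (p : Int × Int) :
    p ∈ pvBSet t ↔ ∃ x y : Nat, x < (t.headD []).length ∧ y < t.length ∧
      p = ((x : Int), (y : Int)) ∧ pvVis t x y := by
  set w := (t.headD []).length with hw
  set h := t.length with hh
  have hh0 : 0 < h := List.length_pos_iff.2 hne
  have hwidth : PySem.List.len (PySem.List.pyGetD t 0 []) = (w : Int) := by
    rw [pvGetD0]; simp [hw]
  have hlent : PySem.List.len t = (h : Int) := by simp [hh]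
  have hdbl : ∀ (f g : Int → Int × Int) (l : List Int) (s : List (Int × Int)) (q : Int × Int),
      q ∈ l.foldl (fun v i => PySem.Set.add (PySem.Set.add v (f i)) (g i)) s ↔
        q ∈ s ∨ ∃ i ∈ l, (q = f i ∨ q = g i) := by
    intro f g l s q
    refine pv_mem_foldl _ (fun i q => q = f i ∨ q = g i) ?_ l s q
    intro s' i q'
    rw [PySem.Set.mem_add, PySem.Set.mem_add]
    tauto
  have hborder : p ∈ pvBorder t ↔
      ((∃ i ∈ PySem.List.pyRange 0 ((w : Nat) : Int) 1, (p = (i, (0 : Int)) ∨ p = (i, (h : Int) - 1))) ∨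
       (∃ i ∈ PySem.List.pyRange 0 ((h : Nat) : Int) 1, (p = ((0 : Int), i) ∨ p = ((w : Int) - 1, i)))) := by
    unfold pvBorder
    rw [hwidth, hlent]
    rw [hdbl (fun i => ((0 : Int), i)) (fun i => ((w : Int) - 1, i)),
      hdbl (fun i => (i, (0 : Int))) (fun i => (i, (h : Int) - 1))]
    simp only [PySem.Set.empty, List.not_mem_nil, false_or]
  have hBx : (∃ i ∈ PySem.List.pyRange 0 ((w : Nat) : Int) 1, (p = (i, (0 : Int)) ∨ p = (i, (h : Int) - 1))) →
      ∃ x y : Nat, x < w ∧ y < h ∧ p = ((x : Int), (y : Int)) ∧ pvVis t x y := by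
    rintro ⟨i, hi, (rfl | rfl)⟩ <;> rw [PySem.List.mem_pyRange_one] at hi
    · exact ⟨i.toNat, 0, by omega, by omega,
        by rw [Prod.ext_iff]; exact ⟨by omega, by omega⟩, pvVis_top t i.toNat⟩
    · exact ⟨i.toNat, h - 1, by omega, by omega,
        by rw [Prod.ext_iff]; exact ⟨by omega, by omega⟩, pvVis_bottom t i.toNat⟩
  have hBy : (∃ i ∈ PySem.List.pyRange 0 ((h : Nat) : Int) 1, (p = ((0 : Int), i) ∨ p = ((w : Int) - 1, i))) →
      ∃ x y : Nat, x < w ∧ y < h ∧ p = ((x : Int), (y : Int)) ∧ pvVis t x y := by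
    rintro ⟨i, hi, (rfl | rfl)⟩ <;> rw [PySem.List.mem_pyRange_one] at hi
    · exact ⟨0, i.toNat, by omega, by omega,
        by rw [Prod.ext_iff]; exact ⟨by omega, by omega⟩, pvVis_left t i.toNat⟩
    · exact ⟨w - 1, i.toNat, by omega, by omega,
        by rw [Prod.ext_iff]; exact ⟨by omega, by omega⟩, pvVis_right t i.toNat⟩
  have hrows : pvRows t = t.map (fun row => row.take w) := by
    unfold pvRows
    rw [hwidth]
    simp [PySem.List.slice_to_natCast]
  have hrlen : (pvRows t).length = h := by rw [hrows, List.length_map, hh]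
  have hrowy : ∀ y : Nat, y < h → (pvRows t).getD y [] = (t.getD y []).take w := by
    intro y hy
    rw [hrows, pv_getD_map _ _ _ (by omega) []]
  have hrowlen : ∀ y : Nat, y < h → ((t.getD y []).take w).length = w := by
    intro y hy
    rw [List.length_take]
    have := hpre _ (pv_row_mem t y (by omega))
    omega
  have hrowval : ∀ y : Nat, y < h → ∀ j : Nat, j < w →
      ((t.getD y []).take w).getD j 0 = pvVal t j y := by
    intro y hy j hj
    have := hpre _ (pv_row_mem t y (by omega))
    exact pv_getD_take _ _ _ hj (by omega)
  have hclen : (pvCols t).length = w := by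
    unfold pvCols
    rw [hwidth, List.length_map, PySem.List.length_pyRange_one]
    omega
  have hcolx : ∀ x : Nat, x < w → (pvCols t).getD x [] = (pvRows t).map (fun row => row.getD x 0) := by
    intro x hx
    unfold pvCols
    rw [hwidth]
    rw [pv_getD_map _ _ _ (by rw [PySem.List.length_pyRange_one]; omega) 0]
    have hx' : (PySem.List.pyRange 0 (w : Int) 1).getD x 0 = (x : Int) := by
      rw [List.getD_eq_getElem _ _ (by rw [PySem.List.length_pyRange_one]; omega),
        PySem.List.getElem_pyRange_one]
      omega
    rw [hx']
    simp
  have hcollen : ∀ x : Nat, x < w → ((pvCols t).getD x []).length = h := by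
    intro x hx; rw [hcolx x hx, List.length_map, hrlen]
  have hcolval : ∀ x : Nat, x < w → ∀ y : Nat, y < h →
      ((pvCols t).getD x []).getD y 0 = pvVal t x y := by
    intro x hx y hy
    rw [hcolx x hx, pv_getD_map _ _ _ (by omega) [], hrowy y hy, hrowval y hy x hx]
  -- membership through the two passes
  have hadd : ∀ (f : Int → Int × Int) (l : List Int) (s : List (Int × Int)) (q : Int × Int),
      q ∈ l.foldl (fun v i => PySem.Set.add v (f i)) s ↔ q ∈ s ∨ ∃ i ∈ l, q = f i := by
    intro f l s q
    exact pv_mem_foldl _ (fun i q => q = f i) (fun s i q => PySem.Set.mem_add s (f i) q) l s q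
  have hrowstep : ∀ (vis : List (Int × Int)) (yr : Int × List Int) (q : Int × Int),
      q ∈ ((pvB_front_visible yr.2.reverse).foldl
          (fun v x => PySem.Set.add v (PySem.List.len yr.2 - 1 - x, yr.1))
          ((pvB_front_visible yr.2).foldl (fun v x => PySem.Set.add v (x, yr.1)) vis)) ↔
        q ∈ vis ∨ ((∃ i ∈ pvB_front_visible yr.2, q = (i, yr.1)) ∨
          (∃ i ∈ pvB_front_visible yr.2.reverse, q = (PySem.List.len yr.2 - 1 - i, yr.1))) := by
    intro vis yr q
    rw [hadd (fun i => (PySem.List.len yr.2 - 1 - i, yr.1)),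
      hadd (fun i => (i, yr.1))]
    rw [or_assoc]
  have hcolstep : ∀ (vis : List (Int × Int)) (xc : Int × List Int) (q : Int × Int),
      q ∈ ((pvB_front_visible xc.2.reverse).foldl
          (fun v y => PySem.Set.add v (xc.1, PySem.List.len xc.2 - 1 - y))
          ((pvB_front_visible xc.2).foldl (fun v y => PySem.Set.add v (xc.1, y)) vis)) ↔
        q ∈ vis ∨ ((∃ i ∈ pvB_front_visible xc.2, q = (xc.1, i)) ∨
          (∃ i ∈ pvB_front_visible xc.2.reverse, q = (xc.1, PySem.List.len xc.2 - 1 - i))) := by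
    intro vis xc q
    rw [hadd (fun i => (xc.1, PySem.List.len xc.2 - 1 - i)),
      hadd (fun i => (xc.1, i))]
    rw [or_assoc]
  -- the four directional characterizations
  have hVL : (∃ yr ∈ PySem.List.enumerate (pvRows t) 0, ∃ i ∈ pvB_front_visible yr.2, p = (i, yr.1)) ↔
      ∃ x y : Nat, x < w ∧ y < h ∧ p = ((x : Int), (y : Int)) ∧
        (∀ j, j < x → pvVal t j y < pvVal t x y) := by
    constructor
    · rintro ⟨yr, hyr, i, hi, rfl⟩
      rcases (PySem.List.mem_enumerate_iff _ _ _).1 hyr with ⟨y, hy, rfl⟩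
      have hyh : y < h := by rw [← hrlen]; exact hy
      have hget : (pvRows t)[y] = (t.getD y []).take w := by
        rw [← List.getD_eq_getElem _ [] hy, hrowy y hyh]
      simp only [hget] at hi
      rcases (pvB_line_fwd _ (fun j => pvVal t j y) w (hrowlen y hyh) (hrowval y hyh) i).1 hi
        with ⟨k, hk, rfl, hc⟩
      exact ⟨k, y, hk, hyh, by simp, hc⟩
    · rintro ⟨x, y, hx, hy, rfl, hc⟩
      refine ⟨((y : Int), (pvRows t).getD y []), ?_, (x : Int), ?_, rfl⟩
      · rw [PySem.List.mem_enumerate_iff]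
        exact ⟨y, by omega, by rw [List.getD_eq_getElem _ _ (by omega)]; simp⟩
      · rw [hrowy y hy]
        exact (pvB_line_fwd _ (fun j => pvVal t j y) w (hrowlen y hy) (hrowval y hy) _).2
          ⟨x, hx, rfl, hc⟩
  have hVR : (∃ yr ∈ PySem.List.enumerate (pvRows t) 0, ∃ i ∈ pvB_front_visible yr.2.reverse,
        p = (PySem.List.len yr.2 - 1 - i, yr.1)) ↔
      ∃ x y : Nat, x < w ∧ y < h ∧ p = ((x : Int), (y : Int)) ∧
        (∀ j, x < j → j < w → pvVal t j y < pvVal t x y) := by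
    constructor
    · rintro ⟨yr, hyr, i, hi, rfl⟩
      rcases (PySem.List.mem_enumerate_iff _ _ _).1 hyr with ⟨y, hy, rfl⟩
      have hyh : y < h := by rw [← hrlen]; exact hy
      have hget : (pvRows t)[y] = (t.getD y []).take w := by
        rw [← List.getD_eq_getElem _ [] hy, hrowy y hyh]
      simp only [hget] at hi ⊢
      rcases (pvB_line_rev _ (fun j => pvVal t j y) w (hrowlen y hyh) (hrowval y hyh) i).1 hi
        with ⟨k, hk, rfl, hc⟩
      refine ⟨w - 1 - k, y, by omega, hyh, ?_, hc⟩
      rw [Prod.ext_iff]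
      constructor
      · simp only [PySem.List.len_eq, hrowlen y hyh]
        omega
      · simp
    · rintro ⟨x, y, hx, hy, rfl, hc⟩
      refine ⟨((y : Int), (pvRows t).getD y []), ?_, ((w - 1 - x : Nat) : Int), ?_, ?_⟩
      · rw [PySem.List.mem_enumerate_iff]
        exact ⟨y, by omega, by rw [List.getD_eq_getElem _ _ (by omega)]; simp⟩
      · rw [hrowy y hy]
        refine (pvB_line_rev _ (fun j => pvVal t j y) w (hrowlen y hy) (hrowval y hy) _).2
          ⟨w - 1 - x, by omega, rfl, ?_⟩
        have he : w - 1 - (w - 1 - x) = x := by omega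
        rw [he]
        exact hc
      · rw [Prod.ext_iff]
        constructor
        · rw [hrowy y hy]
          simp only [PySem.List.len_eq, hrowlen y hy]
          omega
        · simp
  have hVT : (∃ xc ∈ PySem.List.enumerate (pvCols t) 0, ∃ i ∈ pvB_front_visible xc.2,
        p = (xc.1, i)) ↔
      ∃ x y : Nat, x < w ∧ y < h ∧ p = ((x : Int), (y : Int)) ∧
        (∀ j, j < y → pvVal t x j < pvVal t x y) := by
    constructor
    · rintro ⟨xc, hxc, i, hi, rfl⟩
      rcases (PySem.List.mem_enumerate_iff _ _ _).1 hxc with ⟨x, hx, rfl⟩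
      have hxw : x < w := by rw [← hclen]; exact hx
      have hget : (pvCols t)[x] = (pvCols t).getD x [] := by
        rw [List.getD_eq_getElem _ _ hx]
      simp only [hget] at hi
      rcases (pvB_line_fwd _ (fun j => pvVal t x j) h (hcollen x hxw) (hcolval x hxw) i).1 hi
        with ⟨k, hk, rfl, hc⟩
      exact ⟨x, k, hxw, hk, by simp, hc⟩
    · rintro ⟨x, y, hx, hy, rfl, hc⟩
      refine ⟨((x : Int), (pvCols t).getD x []), ?_, (y : Int), ?_, by simp⟩
      · rw [PySem.List.mem_enumerate_iff]
        exact ⟨x, by omega, by rw [List.getD_eq_getElem _ _ (by omega)]; simp⟩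
      · exact (pvB_line_fwd _ (fun j => pvVal t x j) h (hcollen x hx) (hcolval x hx) _).2
          ⟨y, hy, rfl, hc⟩
  have hVB : (∃ xc ∈ PySem.List.enumerate (pvCols t) 0, ∃ i ∈ pvB_front_visible xc.2.reverse,
        p = (xc.1, PySem.List.len xc.2 - 1 - i)) ↔
      ∃ x y : Nat, x < w ∧ y < h ∧ p = ((x : Int), (y : Int)) ∧
        (∀ j, y < j → j < h → pvVal t x j < pvVal t x y) := by
    constructor
    · rintro ⟨xc, hxc, i, hi, rfl⟩
      rcases (PySem.List.mem_enumerate_iff _ _ _).1 hxc with ⟨x, hx, rfl⟩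
      have hxw : x < w := by rw [← hclen]; exact hx
      have hget : (pvCols t)[x] = (pvCols t).getD x [] := by
        rw [List.getD_eq_getElem _ _ hx]
      simp only [hget] at hi ⊢
      rcases (pvB_line_rev _ (fun j => pvVal t x j) h (hcollen x hxw) (hcolval x hxw) i).1 hi
        with ⟨k, hk, rfl, hc⟩
      refine ⟨x, h - 1 - k, hxw, by omega, ?_, hc⟩
      rw [Prod.ext_iff]
      constructor
      · simp
      · simp only [PySem.List.len_eq, hcollen x hxw]
        omega
    · rintro ⟨x, y, hx, hy, rfl, hc⟩
      refine ⟨((x : Int), (pvCols t).getD x []), ?_, ((h - 1 - y : Nat) : Int), ?_, ?_⟩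
      · rw [PySem.List.mem_enumerate_iff]
        exact ⟨x, by omega, by rw [List.getD_eq_getElem _ _ (by omega)]; simp⟩
      · refine (pvB_line_rev _ (fun j => pvVal t x j) h (hcollen x hx) (hcolval x hx) _).2
          ⟨h - 1 - y, by omega, rfl, ?_⟩
        have he : h - 1 - (h - 1 - y) = y := by omega
        rw [he]
        exact hc
      · rw [Prod.ext_iff]
        constructor
        · simp
        · simp only [PySem.List.len_eq, hcollen x hx]
          omega
  -- assemble
  unfold pvBSet
  refine Iff.trans (pv_mem_foldl _
    (fun (xc : Int × List Int) q => (∃ i ∈ pvB_front_visible xc.2, q = (xc.1, i)) ∨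
      (∃ i ∈ pvB_front_visible xc.2.reverse, q = (xc.1, PySem.List.len xc.2 - 1 - i)))
    hcolstep _ _ p) ?_
  rw [pv_mem_foldl _
    (fun (yr : Int × List Int) q => (∃ i ∈ pvB_front_visible yr.2, q = (i, yr.1)) ∨
      (∃ i ∈ pvB_front_visible yr.2.reverse, q = (PySem.List.len yr.2 - 1 - i, yr.1)))
    hrowstep (PySem.List.enumerate (pvRows t) 0) (pvBorder t) p]
  rw [hborder]
  simp only [and_or_left, exists_or]
  rw [hVL, hVR, hVT, hVB]
  unfold pvVis
  rw [← hw, ← hh]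
  constructor
  · rintro ((((hbx | hbx) | hby | hby) | hA | hB) | hC | hD)
    · rcases hbx with ⟨i, hi, hp⟩
      exact hBx ⟨i, hi, Or.inl hp⟩
    · rcases hbx with ⟨i, hi, hp⟩
      exact hBx ⟨i, hi, Or.inr hp⟩
    · rcases hby with ⟨i, hi, hp⟩
      exact hBy ⟨i, hi, Or.inl hp⟩
    · rcases hby with ⟨i, hi, hp⟩
      exact hBy ⟨i, hi, Or.inr hp⟩
    · rcases hA with ⟨x, y, h1, h2, h3, hc⟩
      exact ⟨x, y, h1, h2, h3, Or.inl hc⟩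
    · rcases hB with ⟨x, y, h1, h2, h3, hc⟩
      exact ⟨x, y, h1, h2, h3, Or.inr (Or.inl hc)⟩
    · rcases hC with ⟨x, y, h1, h2, h3, hc⟩
      exact ⟨x, y, h1, h2, h3, Or.inr (Or.inr (Or.inl hc))⟩
    · rcases hD with ⟨x, y, h1, h2, h3, hc⟩
      exact ⟨x, y, h1, h2, h3, Or.inr (Or.inr (Or.inr hc))⟩
  · rintro ⟨x, y, h1, h2, h3, (hc | hc | hc | hc)⟩
    · exact Or.inl (Or.inr (Or.inl ⟨x, y, h1, h2, h3, hc⟩))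
    · exact Or.inl (Or.inr (Or.inr ⟨x, y, h1, h2, h3, hc⟩))
    · exact Or.inr (Or.inl ⟨x, y, h1, h2, h3, hc⟩)
    · exact Or.inr (Or.inr ⟨x, y, h1, h2, h3, hc⟩)

theorem pvCanonSet_congr (A B : List (Int × Int)) (hB : B.Nodup) (hperm : B.Perm A) :
    pvCanonSet A = pvCanonSet B := by
  unfold pvCanonSet
  apply PySem.List.sorted_eq_of_perm_of_pairwise_lt
  · exact (PySem.List.sorted_perm B _ false).trans hperm
  · have h1 := PySem.List.sorted_pairwise (xs := B) (key := fun p : Int × Int => (toLex p : Int ×ₗ Int))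
    have h2 : (PySem.List.sorted B (fun p : Int × Int => (toLex p : Int ×ₗ Int))).Nodup :=
      ((PySem.List.sorted_perm B _ false).nodup_iff).2 hB
    have h2' : List.Pairwise (fun a b : Int × Int => a ≠ b)
        (PySem.List.sorted B (fun p : Int × Int => (toLex p : Int ×ₗ Int))) := h2
    refine (h1.and h2').imp ?_
    rintro a b ⟨hle, hne⟩
    exact lt_of_le_of_ne hle (fun he => hne (toLex.injective he))

theorem pv_foldl_congr_id {α β : Type} (F : β → α → β) (l : List α)
    (h : ∀ s, ∀ a ∈ l, F s a = s) : ∀ s, l.foldl F s = s := by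
  induction l with
  | nil => intro s; rfl
  | cons a l ih =>
    intro s
    rw [List.foldl_cons, h s a List.mem_cons_self]
    exact ih (fun s' a' ha' => h s' a' (List.mem_cons_of_mem a ha')) s

-- the zero-width case: A returns the two phantom border columns x = 0 and x = -1, and so does B
theorem pvA0_mem (t : List (List Int)) (hhead : t.headD [] = []) (p : Int × Int) :
    p ∈ pvASet t ↔ (p.1 = 0 ∨ p.1 = -1) ∧ 0 ≤ p.2 ∧ p.2 < (t.length : Int) := by
  have hmx : PySem.List.len (PySem.List.pyGetD t 0 []) - 1 = (-1 : Int) := by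
    rw [pvGetD0, hhead]; rfl
  unfold pvASet
  rw [hmx]
  rw [PySem.List.pyRange_one_eq_nil (by norm_num : (-1 : Int) ≤ 1)]
  simp only [List.flatMap_nil, List.foldl_nil]
  unfold pvA_get_edge_cells
  rw [show (-1 : Int) + 1 = 0 by norm_num, PySem.List.pyRange_one_eq_nil (le_refl (0 : Int)),
    show PySem.List.len t - 1 + 1 = PySem.List.len t by ring]
  simp only [PySem.Set.mem_update, PySem.Set.mem_ofList, List.flatMap_nil, List.mem_flatMap,
    List.mem_map, List.mem_cons, List.not_mem_nil, PySem.List.mem_pyRange_one, PySem.Set.empty,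
    false_or, PySem.List.len_eq]
  constructor
  · rintro ⟨x, (rfl | rfl | hfalse), y, hy, rfl⟩
    · exact ⟨Or.inl rfl, hy.1, hy.2⟩
    · exact ⟨Or.inr rfl, hy.1, hy.2⟩
    · exact absurd hfalse (by simp)
  · rintro ⟨h1 | h1, h2, h3⟩
    · exact ⟨0, Or.inl rfl, p.2, ⟨h2, h3⟩, by rw [Prod.ext_iff]; exact ⟨h1.symm, rfl⟩⟩
    · exact ⟨-1, Or.inr (Or.inl rfl), p.2, ⟨h2, h3⟩, by rw [Prod.ext_iff]; exact ⟨h1.symm, rfl⟩⟩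

theorem pvB0_mem (t : List (List Int)) (hhead : t.headD [] = []) (p : Int × Int) :
    p ∈ pvBSet t ↔ (p.1 = 0 ∨ p.1 = -1) ∧ 0 ≤ p.2 ∧ p.2 < (t.length : Int) := by
  have hw0 : PySem.List.len (PySem.List.pyGetD t 0 []) = 0 := by
    rw [pvGetD0, hhead]; rfl
  have hcols : pvCols t = [] := by
    unfold pvCols
    rw [hw0, PySem.List.pyRange_one_eq_nil (le_refl (0 : Int))]
    rfl
  have hrows : pvRows t = t.map (fun _ => []) := by
    unfold pvRows
    rw [hw0]
    simp [PySem.List.slice_to]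
  have hBnil : pvBSet t = pvBorder t := by
    unfold pvBSet
    rw [hcols, PySem.List.enumerate_nil, List.foldl_nil]
    apply pv_foldl_congr_id
    intro s a ha
    rcases (PySem.List.mem_enumerate_iff _ _ _).1 ha with ⟨k, hk, rfl⟩
    have hkt : k < t.length := by
      have := hk
      rw [hrows, List.length_map] at this
      exact this
    have h2 : (pvRows t)[k]? = some [] := by
      rw [hrows, List.getElem?_map, List.getElem?_eq_getElem hkt]
      rfl
    have h3 : (pvRows t)[k] = ([] : List Int) :=
      (Option.some_inj.mp (h2.symm.trans (List.getElem?_eq_getElem hk))).symm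
    rw [h3]
    rfl
  rw [hBnil]
  unfold pvBorder
  rw [hw0, PySem.List.pyRange_one_eq_nil (le_refl (0 : Int)), List.foldl_nil,
    show (0 : Int) - 1 = -1 by norm_num]
  have hdbl : ∀ (f g : Int → Int × Int) (l : List Int) (s : List (Int × Int)) (q : Int × Int),
      q ∈ l.foldl (fun v i => PySem.Set.add (PySem.Set.add v (f i)) (g i)) s ↔
        q ∈ s ∨ ∃ i ∈ l, (q = f i ∨ q = g i) := by
    intro f g l s q
    refine pv_mem_foldl _ (fun i q => q = f i ∨ q = g i) ?_ l s q
    intro s' i q'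
    rw [PySem.Set.mem_add, PySem.Set.mem_add]
    tauto
  rw [hdbl (fun i => ((0 : Int), i)) (fun i => ((-1 : Int), i))]
  simp only [PySem.Set.empty, List.not_mem_nil, false_or, PySem.List.mem_pyRange_one,
    PySem.List.len_eq]
  constructor
  · rintro ⟨i, hi, (rfl | rfl)⟩
    · exact ⟨Or.inl rfl, hi.1, hi.2⟩
    · exact ⟨Or.inr rfl, hi.1, hi.2⟩
  · rintro ⟨h1 | h1, h2, h3⟩
    · exact ⟨p.2, ⟨h2, h3⟩, Or.inl (by rw [Prod.ext_iff]; exact ⟨h1, rfl⟩)⟩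
    · exact ⟨p.2, ⟨h2, h3⟩, Or.inr (by rw [Prod.ext_iff]; exact ⟨h1, rfl⟩)⟩

-- ===== VERDICT (by name: the statement is the Claim_ definition above) =====
theorem get_visible_cells_spec : Claim_equal_get_visible_cells := by
  intro t hdom hpre
  unfold Spec_get_visible_cells
  obtain ⟨hne, hrowsge⟩ := hpre
  rw [pvA_eq, pvB_eq]
  rcases Nat.eq_zero_or_pos (t.headD []).length with hw0 | hw0
  · have hhead : t.headD [] = [] := List.length_eq_zero_iff.1 hw0
    have hperm : (pvBSet t).Perm (pvASet t) := by
      rw [List.perm_ext_iff_of_nodup (pvBSet_nodup t) (pvASet_nodup t)]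
      intro q
      rw [pvB0_mem t hhead q, pvA0_mem t hhead q]
    exact pvCanonSet_congr (pvASet t) (pvBSet t) (pvBSet_nodup t) hperm
  · have hperm : (pvBSet t).Perm (pvASet t) := by
      rw [List.perm_ext_iff_of_nodup (pvBSet_nodup t) (pvASet_nodup t)]
      intro q
      rw [pvB_mem t hne hrowsge hw0 q, pvA_mem t hne hrowsge hw0 q]
    exact pvCanonSet_congr (pvASet t) (pvBSet t) (pvBSet_nodup t) hperm
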